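-- pv_equiv track=rewrite | github.com/hanzoai/python-sdk | pkg/hanzo-mcp/hanzo_mcp/tools/refactor/refactor_tool.py | _organize_python_imports
-- ===== SOURCE A (Python) =====
-- def _organize_python_imports(content: str) -> str:
--     """Organize Python import statements."""
--     lines = content.split("\n")
--     imports = []
--     from_imports = []
--     other_lines = []
--     import_section_ended = False
--
--     for line in lines:
--         stripped = line.strip()
--         if not import_section_ended:
--             if stripped.startswith("import "):
--                 imports.append(line)
--             elif stripped.startswith("from "):
--                 from_imports.append(line)
--             elif stripped and not stripped.startswith("#"):
--                 import_section_ended = True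
--                 other_lines.append(line)
--             else:
--                 if imports or from_imports:
--                     import_section_ended = True
--                 other_lines.append(line)
--         else:
--             other_lines.append(line)
--
--     # Sort imports
--     imports.sort(key=lambda x: x.strip().lower())
--     from_imports.sort(key=lambda x: x.strip().lower())
--
--     # Reconstruct
--     result = []
--     if imports:
--         result.extend(imports)
--     if from_imports:
--         if imports:
--             result.append("")
--         result.extend(from_imports)
--     if imports or from_imports:
--         result.append("")
--     result.extend(other_lines)
--
--     return "\n".join(result)
-- ===== SOURCE B (Python) =====
-- def _organize_python_imports(content: str) -> str:
--     """Organize Python import statements (boundary scan + partition)."""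
--     lines = content.split("\n")
--
--     def kind(line):
--         s = line.strip()
--         if s.startswith("import "):
--             return "import"
--         if s.startswith("from "):
--             return "from"
--         if s and not s.startswith("#"):
--             return "code"
--         return "blank"  # blank line or comment
--
--     # find the end of the import section
--     end = len(lines)
--     seen_import = False
--     for i, line in enumerate(lines):
--         k = kind(line)
--         if k in ("import", "from"):
--             seen_import = True
--         elif k == "code" or seen_import:
--             end = i
--             break
--
--     prefix = lines[:end]
--     imports = sorted((l for l in prefix if kind(l) == "import"),
--                      key=lambda x: x.strip().lower())
--     from_imports = sorted((l for l in prefix if kind(l) == "from"),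
--                           key=lambda x: x.strip().lower())
--     other_lines = [l for l in prefix if kind(l) not in ("import", "from")] + lines[end:]
--
--     result = []
--     if imports:
--         result.extend(imports)
--     if from_imports:
--         if imports:
--             result.append("")
--         result.extend(from_imports)
--     if imports or from_imports:
--         result.append("")
--     result.extend(other_lines)
--     return "\n".join(result)
-- ===== Notes on version B (the rewrite author's own statement) =====
-- stated objective: alternative
-- what changed: Replaces A's single stateful routing loop (ended-flag mutated while classifying every line) with a two-pass decomposition: first a boundary scan computes the import-section end index, then comprehensions partition the prefix into imports/from-imports/other and the tail is appended verbatim.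
import Mathlib
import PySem

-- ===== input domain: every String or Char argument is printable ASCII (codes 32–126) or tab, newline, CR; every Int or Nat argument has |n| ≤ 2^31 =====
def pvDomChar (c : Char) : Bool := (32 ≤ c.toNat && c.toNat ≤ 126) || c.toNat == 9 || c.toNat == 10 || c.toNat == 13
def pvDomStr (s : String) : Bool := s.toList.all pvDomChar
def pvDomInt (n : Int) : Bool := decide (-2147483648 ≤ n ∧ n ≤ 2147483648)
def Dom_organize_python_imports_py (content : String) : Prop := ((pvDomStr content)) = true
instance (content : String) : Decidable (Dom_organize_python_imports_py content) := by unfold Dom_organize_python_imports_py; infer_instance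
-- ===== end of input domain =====

-- B replaces A's stateful routing loop by a boundary scan followed by partition comprehensions (alternative decomposition, same cost).

-- ===== PORT A =====
-- shared sort key: x.strip().lower()
def pyKey (x : String) : String := PySem.Str.lower (PySem.Str.strip x)

-- A's single for-loop with mutable state (imports, from_imports, other_lines, import_section_ended)
def orgLoopA : List String → List String → List String → List String → Bool →
    List String × List String × List String
  | [], imps, frs, oth, _ => (imps, frs, oth)
  | l :: rest, imps, frs, oth, ended =>
    if ended then orgLoopA rest imps frs (oth ++ [l]) ended
    else
      if PySem.Str.startswith (PySem.Str.strip l) "import " then orgLoopA rest (imps ++ [l]) frs oth false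
      else if PySem.Str.startswith (PySem.Str.strip l) "from " then orgLoopA rest imps (frs ++ [l]) oth false
      else if PySem.Str.strip l ≠ "" ∧ PySem.Str.startswith (PySem.Str.strip l) "#" = false then orgLoopA rest imps frs (oth ++ [l]) true
      else if imps ≠ [] ∨ frs ≠ [] then orgLoopA rest imps frs (oth ++ [l]) true
      else orgLoopA rest imps frs (oth ++ [l]) false

def organize_python_imports_py (content : String) : String :=
  let lines := (PySem.Str.split? content "\n").getD []   -- content.split("\n"); sep ≠ "" so split? is `some`
  let t := orgLoopA lines [] [] [] false
  let imports := PySem.List.sorted t.1 pyKey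
  let from_imports := PySem.List.sorted t.2.1 pyKey
  let result :=
    (if imports ≠ [] then imports else [])
    ++ (if from_imports ≠ [] then (if imports ≠ [] then [""] else []) ++ from_imports else [])
    ++ (if imports ≠ [] ∨ from_imports ≠ [] then [""] else [])
    ++ t.2.2
  PySem.Str.join "\n" result

-- ===== PORT B =====
-- Source B's kind(line): classify one line
def kindB (line : String) : String :=
  if PySem.Str.startswith (PySem.Str.strip line) "import " then "import"
  else if PySem.Str.startswith (PySem.Str.strip line) "from " then "from"
  else if PySem.Str.strip line ≠ "" ∧ PySem.Str.startswith (PySem.Str.strip line) "#" = false then "code"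
  else "blank"

-- Source B's boundary loop: index of the first line ending the import section (length if none)
def findEndB : List String → Bool → Nat
  | [], _ => 0
  | l :: rest, seen =>
    if kindB l = "import" ∨ kindB l = "from" then findEndB rest true + 1
    else if kindB l = "code" ∨ seen = true then 0
    else findEndB rest seen + 1

def organize_python_imports_py_alt (content : String) : String :=
  let lines := (PySem.Str.split? content "\n").getD []   -- content.split("\n"); sep ≠ "" so split? is `some`
  let e := findEndB lines false
  let pre := lines.take e
  let imports := PySem.List.sorted (pre.filter (fun l => kindB l = "import")) pyKey
  let from_imports := PySem.List.sorted (pre.filter (fun l => kindB l = "from")) pyKey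
  let other_lines := pre.filter (fun l => ¬ (kindB l = "import" ∨ kindB l = "from")) ++ lines.drop e
  let result :=
    (if imports ≠ [] then imports else [])
    ++ (if from_imports ≠ [] then (if imports ≠ [] then [""] else []) ++ from_imports else [])
    ++ (if imports ≠ [] ∨ from_imports ≠ [] then [""] else [])
    ++ other_lines
  PySem.Str.join "\n" result

-- ===== PRECONDITION & SPEC =====
def Spec_organize_python_imports_py (content : String) (out : String) : Prop := out = organize_python_imports_py_alt content
instance (content : String) (out : String) : Decidable (Spec_organize_python_imports_py content out) := by unfold Spec_organize_python_imports_py; infer_instance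

-- ===== CLAIM (what is proved, stated in full; the proofs are below) =====
def Claim_equal_organize_python_imports_py : Prop := ∀ (content : String), Dom_organize_python_imports_py content → Spec_organize_python_imports_py content (organize_python_imports_py content)

-- ===== LEMMAS AND PROOFS =====

theorem kindB_cases (l : String) :
    kindB l = "import" ∨ kindB l = "from" ∨ kindB l = "code" ∨ kindB l = "blank" := by
  unfold kindB; split_ifs <;> simp

theorem kindB_import {l : String} (h : kindB l = "import") :
    PySem.Str.startswith (PySem.Str.strip l) "import " = true := by
  unfold kindB at h; split_ifs at h with h1 h2 h3 <;> simp_all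

theorem kindB_from {l : String} (h : kindB l = "from") :
    PySem.Str.startswith (PySem.Str.strip l) "import " = false ∧
    PySem.Str.startswith (PySem.Str.strip l) "from " = true := by
  unfold kindB at h; split_ifs at h with h1 h2 h3 <;> simp_all

theorem kindB_code {l : String} (h : kindB l = "code") :
    PySem.Str.startswith (PySem.Str.strip l) "import " = false ∧
    PySem.Str.startswith (PySem.Str.strip l) "from " = false ∧
    (PySem.Str.strip l ≠ "" ∧ PySem.Str.startswith (PySem.Str.strip l) "#" = false) := by
  unfold kindB at h; split_ifs at h with h1 h2 h3 <;> simp_all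

theorem kindB_blank {l : String} (h : kindB l = "blank") :
    PySem.Str.startswith (PySem.Str.strip l) "import " = false ∧
    PySem.Str.startswith (PySem.Str.strip l) "from " = false ∧
    ¬ (PySem.Str.strip l ≠ "" ∧ PySem.Str.startswith (PySem.Str.strip l) "#" = false) := by
  unfold kindB at h; split_ifs at h with h1 h2 h3 <;> simp_all

-- once the section has ended, A's loop only copies lines into other_lines
theorem orgLoopA_ended (lines : List String) : ∀ (imps frs oth : List String),
    orgLoopA lines imps frs oth true = (imps, frs, oth ++ lines) := by
  induction lines with
  | nil => intro imps frs oth; simp [orgLoopA]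
  | cons l rest ih => intro imps frs oth; simp [orgLoopA, ih]

-- A's running loop equals B's boundary-then-partition description
theorem orgLoopA_eq (lines : List String) : ∀ (imps frs oth : List String),
    orgLoopA lines imps frs oth false =
      (imps ++ (lines.take (findEndB lines (decide (imps ≠ [] ∨ frs ≠ [])))).filter (fun l => kindB l = "import"),
       frs ++ (lines.take (findEndB lines (decide (imps ≠ [] ∨ frs ≠ [])))).filter (fun l => kindB l = "from"),
       oth ++ (lines.take (findEndB lines (decide (imps ≠ [] ∨ frs ≠ [])))).filter (fun l => ¬ (kindB l = "import" ∨ kindB l = "from"))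
           ++ lines.drop (findEndB lines (decide (imps ≠ [] ∨ frs ≠ [])))) := by
  induction lines with
  | nil => intro imps frs oth; simp [orgLoopA, findEndB]
  | cons l rest ih =>
    intro imps frs oth
    rcases kindB_cases l with hk | hk | hk | hk
    · have hA := kindB_import hk
      simp at hA
      have hrec := ih (imps ++ [l]) frs oth
      simp [orgLoopA, findEndB, hk, hA] at hrec ⊢
      simpa using hrec
    · obtain ⟨hA, hB⟩ := kindB_from hk
      simp at hA hB
      have hrec := ih imps (frs ++ [l]) oth
      simp [orgLoopA, findEndB, hk, hA, hB] at hrec ⊢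
      simpa using hrec
    · obtain ⟨hA, hB, hC⟩ := kindB_code hk
      obtain ⟨hC1, hC2⟩ := hC
      simp at hA hB hC2
      simp [orgLoopA, findEndB, hk, hA, hB, hC1, hC2, orgLoopA_ended]
    · obtain ⟨hA, hB, hC⟩ := kindB_blank hk
      simp at hA hB hC
      by_cases h4 : imps ≠ [] ∨ frs ≠ []
      · simp [orgLoopA, findEndB, hk, hA, hB, h4, orgLoopA_ended]
      · have hC' : ¬(¬PySem.Str.strip l = "" ∧ PySem.Chars.startswith (PySem.Chars.strip l.toList) ['#'] = false) := by
          simpa using hC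
        have hrec := ih imps frs (oth ++ [l])
        simp [orgLoopA, findEndB, hk, hA, hB, hC', h4] at hrec ⊢
        simpa using hrec

-- ===== VERDICT (by name: the statement is the Claim_ definition above) =====
theorem organize_python_imports_py_spec : Claim_equal_organize_python_imports_py := by
  intro content _
  unfold Spec_organize_python_imports_py organize_python_imports_py organize_python_imports_py_alt
  have h := orgLoopA_eq ((PySem.Str.split? content "\n").getD []) [] [] []
  simp at h
  simp [h]
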